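-- pv_equiv track=rewrite | github.com/vikasmunshi/euler | stack/0/0/3/8/solve_pandigital_multiples_p0038_s0.py | is_nine_pandigital
-- ===== SOURCE A (Python) =====
-- def is_nine_pandigital(n: int) -> bool:
--     if n < 100000000 or n > 999999999:
--         return False
--     digits: list[int] = [0] * 10
--     while n:
--         d = n % 10
--         if d == 0 or digits[d] == 1:
--             return False
--         digits[d] = 1
--         n //= 10
--     return sum(digits[1:]) == 9
-- ===== SOURCE B (Python) =====
-- def is_nine_pandigital(n: int) -> bool:
--     return sorted(str(n)) == list('123456789')
-- ===== Notes on version B (the rewrite author's own statement) =====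
-- stated objective: idiomatic
-- what changed: Replaces the range guard plus mod-10 digit-extraction loop with a seen-array by a one-line sorted-string comparison against '123456789', which enforces length, digit range and distinctness at once.
import Mathlib
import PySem

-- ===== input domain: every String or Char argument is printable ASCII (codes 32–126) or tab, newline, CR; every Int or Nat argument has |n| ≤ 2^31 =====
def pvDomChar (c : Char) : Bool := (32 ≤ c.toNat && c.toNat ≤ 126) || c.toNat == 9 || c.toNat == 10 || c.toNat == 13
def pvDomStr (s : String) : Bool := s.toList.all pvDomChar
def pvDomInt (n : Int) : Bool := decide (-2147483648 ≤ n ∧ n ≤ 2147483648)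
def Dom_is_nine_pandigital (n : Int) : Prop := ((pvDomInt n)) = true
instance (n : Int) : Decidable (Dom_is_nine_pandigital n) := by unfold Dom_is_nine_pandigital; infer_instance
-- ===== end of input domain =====

-- B replaces A's range guard + mod-10 digit-extraction loop with a seen-array by the
-- idiomatic one-liner sorted(str(n)) == list('123456789') (objective: idiomatic).

-- ===== PORT A =====
def pandLoop (n : Int) (digits : List Int) : Bool :=
  if _h : n ≤ 0 then
    (PySem.List.slice digits (some 1) none).sum == 9
  else
    let d := PySem.Int.mod n 10
    if d == 0 || PySem.List.pyGet? digits d == some 1 then false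
    else
      pandLoop (PySem.Int.floordiv n 10) (digits.set d.toNat 1)
  termination_by n.toNat
  decreasing_by
    have h10 : (0:Int) < 10 := by norm_num
    rw [PySem.Int.floordiv_eq_ediv_of_pos h10]
    omega

def is_nine_pandigital (n : Int) : Bool :=
  if n < 100000000 || n > 999999999 then false
  else pandLoop n (List.replicate 10 0)

-- ===== PORT B =====
def is_nine_pandigital_alt (n : Int) : Bool :=
  PySem.List.sorted (PySem.Int.toStr n).toList (fun c => c) false == "123456789".toList

-- ===== PRECONDITION & SPEC =====
def Spec_is_nine_pandigital (n : Int) (out : Bool) : Prop := out = is_nine_pandigital_alt n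
instance (n : Int) (out : Bool) : Decidable (Spec_is_nine_pandigital n out) := by unfold Spec_is_nine_pandigital; infer_instance

-- ===== CLAIM (what is proved, stated in full; the proofs are below) =====
def Claim_equal_is_nine_pandigital : Prop := ∀ (n : Int), Dom_is_nine_pandigital n → Spec_is_nine_pandigital n (is_nine_pandigital n)

-- ===== LEMMAS AND PROOFS =====
lemma getD_set_char (ds : List Int) (r : ℕ) (hr : r < ds.length) (e : ℕ) :
    (ds.set r 1).getD e 0 = if e = r then 1 else ds.getD e 0 := by
  simp only [List.getD_eq_getElem?_getD, List.getElem?_set]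
  by_cases h : r = e
  · subst h; simp [hr]
  · rw [if_neg h, if_neg (fun he => h he.symm)]

lemma sum_set_drop_one (ds : List Int) (r : ℕ) (hr1 : 1 ≤ r) (hr : r < ds.length) :
    ((ds.set r 1).drop 1).sum = (ds.drop 1).sum + 1 - ds.getD r 0 := by
  have hsplit : ds.drop 1 = (ds.take r).drop 1 ++ ds[r] :: ds.drop (r+1) := by
    conv_lhs => rw [← List.take_append_drop r ds]
    rw [List.drop_append_of_le_length (by simp; omega), List.drop_eq_getElem_cons hr]
  have hset : (ds.set r 1).drop 1 = (ds.take r).drop 1 ++ (1:Int) :: ds.drop (r+1) := by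
    rw [List.set_eq_take_append_cons_drop, if_pos hr]
    rw [List.drop_append_of_le_length (by simp; omega)]
  rw [hset, hsplit, List.getD_eq_getElem ds 0 hr]
  simp only [List.sum_append, List.sum_cons]
  ring

lemma loop_char (m : ℕ) : ∀ ds : List Int, ds.length = 10 → (∀ x ∈ ds, x = 0 ∨ x = 1) →
    (pandLoop (m:Int) ds = true ↔
      ((Nat.digits 10 m).Nodup ∧ (∀ e ∈ Nat.digits 10 m, e ≠ 0 ∧ ds.getD e 0 ≠ 1)
        ∧ (ds.drop 1).sum + (Nat.digits 10 m).length = 9)) := by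
  induction m using Nat.strong_induction_on with
  | _ m IH =>
    intro ds hlen hbit
    by_cases hm : m = 0
    · subst hm
      rw [pandLoop]
      simp [pysem]
    · have hmpos : 0 < m := Nat.pos_of_ne_zero hm
      have hdig : Nat.digits 10 m = m % 10 :: Nat.digits 10 (m/10) := Nat.digits_def' (by norm_num) hmpos
      have hr10 : m % 10 < 10 := Nat.mod_lt _ (by norm_num)
      rw [pandLoop]
      have hnle : ¬ ((m:Int) ≤ 0) := by exact_mod_cast not_le.mpr (by exact_mod_cast hmpos)
      rw [dif_neg hnle]
      have hmod : PySem.Int.mod (m:Int) 10 = ((m % 10 : ℕ):Int) := by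
        exact_mod_cast PySem.Int.mod_natCast m 10
      have hfd : PySem.Int.floordiv (m:Int) 10 = ((m/10 : ℕ):Int) := by
        exact_mod_cast PySem.Int.floordiv_natCast m 10
      have hget : PySem.List.pyGet? ds ((m % 10 : ℕ):Int) = ds[(m % 10)]? :=
        PySem.List.pyGet?_natCast ds (m % 10)
      have hidx : ds[(m % 10)]? = some (ds.getD (m % 10) 0) := by
        rw [List.getD_eq_getElem ds 0 (by omega)]
        exact List.getElem?_eq_getElem (by omega)
      simp only [hmod, hfd, hget, hidx]
      have hcond : ((((m % 10 : ℕ):Int) == 0) || (some (ds.getD (m % 10) 0) == some 1)) = true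
          ↔ (m % 10 = 0 ∨ ds.getD (m % 10) 0 = 1) := by
        have hdvd : ((10:Int) ∣ (m:Int)) ↔ m % 10 = 0 := by omega
        simp [hdvd, List.getD_eq_getElem?_getD]
      by_cases hz : m % 10 = 0 ∨ ds.getD (m % 10) 0 = 1
      · rw [if_pos (hcond.mpr hz)]
        simp only [Bool.false_eq_true, false_iff, hdig]
        rintro ⟨-, h2, -⟩
        obtain ⟨hne, hng⟩ := h2 (m % 10) (List.mem_cons_self)
        tauto
      · push Not at hz
        obtain ⟨hz1, hz2⟩ := hz
        rw [if_neg (fun h => (by tauto : ¬ (m % 10 = 0 ∨ ds.getD (m % 10) 0 = 1)) (hcond.mp h))]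
        have hr1 : 1 ≤ m % 10 := Nat.one_le_iff_ne_zero.mpr hz1
        have hg0 : ds.getD (m % 10) 0 = 0 := by
          have hmem : ds.getD (m % 10) 0 ∈ ds := by
            rw [List.getD_eq_getElem ds 0 (by omega)]
            exact List.getElem_mem _
          rcases hbit _ hmem with h | h
          · exact h
          · exact absurd h hz2
        have htn : ((((m % 10 : ℕ):Int)).toNat) = m % 10 := Int.toNat_natCast _
        rw [htn]
        rw [IH (m/10) (Nat.div_lt_self hmpos (by norm_num)) (ds.set (m % 10) 1)
            (by simp [hlen]) (fun x hx => by
              rcases List.mem_or_eq_of_mem_set hx with h | h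
              · exact hbit x h
              · right; exact h)]
        have hsum := sum_set_drop_one ds (m % 10) hr1 (by omega)
        rw [hg0] at hsum
        have hlt : ∀ e ∈ Nat.digits 10 (m/10), e < 10 := fun e he => Nat.digits_lt_base (by norm_num) he
        constructor
        · rintro ⟨h1, h2, h3⟩
          rw [hdig]
          refine ⟨List.nodup_cons.mpr ⟨fun hmem => ?_, h1⟩, List.forall_mem_cons.mpr ⟨⟨hz1, hz2⟩, fun e he => ?_⟩, ?_⟩
          · obtain ⟨-, hgd⟩ := h2 _ hmem
            rw [getD_set_char ds (m % 10) (by omega) (m % 10)] at hgd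
            simp at hgd
          · obtain ⟨he0, hgd⟩ := h2 e he
            rw [getD_set_char ds (m % 10) (by omega) e] at hgd
            refine ⟨he0, ?_⟩
            by_cases hee : e = m % 10
            · subst hee; rw [hg0]; omega
            · rwa [if_neg hee] at hgd
          · simp only [List.length_cons]
            rw [hsum] at h3
            push_cast at h3 ⊢
            omega
        · rw [hdig]
          rintro ⟨h1, h2, h3⟩
          rw [List.nodup_cons] at h1
          rw [List.forall_mem_cons] at h2
          refine ⟨h1.2, fun e he => ?_, ?_⟩
          · obtain ⟨he0, hgd⟩ := h2.2 e he
            refine ⟨he0, ?_⟩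
            rw [getD_set_char ds (m % 10) (by omega) e]
            have hee : e ≠ m % 10 := fun h => h1.1 (h ▸ he)
            rwa [if_neg hee]
          · rw [hsum]
            simp only [List.length_cons] at h3
            push_cast at h3 ⊢
            omega

lemma toDigitsCore_eq_digits (fuel : ℕ) : ∀ (m : ℕ), 0 < m → m < fuel → ∀ ds : List Char,
    Nat.toDigitsCore 10 fuel m ds = ((Nat.digits 10 m).map Nat.digitChar).reverse ++ ds := by
  induction fuel with
  | zero => intro m hm hf; omega
  | succ f IHf =>
    intro m hm hf ds
    have hdig : Nat.digits 10 m = m % 10 :: Nat.digits 10 (m/10) := Nat.digits_def' (by norm_num) hm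
    rw [Nat.toDigitsCore]
    by_cases hq : m / 10 = 0
    · rw [if_pos hq, hdig, hq]
      simp
    · rw [if_neg hq]
      rw [IHf (m/10) (Nat.pos_of_ne_zero hq) (by omega) _]
      rw [hdig]
      simp

lemma toChars_pos (m : ℕ) (hm : 0 < m) :
    PySem.Int.toChars ((m:ℕ):Int) = ((Nat.digits 10 m).map Nat.digitChar).reverse := by
  rw [PySem.Int.toChars]
  rw [if_neg (by exact_mod_cast not_lt.mpr (Int.natCast_nonneg m))]
  rw [Int.toNat_natCast]
  rw [Nat.toDigits, toDigitsCore_eq_digits (m+1) m hm (by omega) []]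
  rw [List.append_nil]

lemma digits_perm_iff (m : ℕ) :
    ((Nat.digits 10 m).Nodup ∧ (∀ e ∈ Nat.digits 10 m, e ≠ 0) ∧ (Nat.digits 10 m).length = 9)
      ↔ (Nat.digits 10 m).Perm [1,2,3,4,5,6,7,8,9] := by
  constructor
  · rintro ⟨h1, h2, h3⟩
    have hsub : Nat.digits 10 m ⊆ [1,2,3,4,5,6,7,8,9] := by
      intro e he
      have := Nat.digits_lt_base (by norm_num) he
      have := h2 e he
      simp only [List.mem_cons, List.not_mem_nil, or_false]
      omega
    exact (List.subperm_of_subset h1 hsub).perm_of_length_le (by simp [h3])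
  · intro h
    refine ⟨h.nodup_iff.mpr (by decide), fun e he => ?_, by simpa using h.length_eq⟩
    have := h.mem_iff.mp he
    simp only [List.mem_cons, List.not_mem_nil, or_false] at this
    omega

lemma alt_true_iff (n : Int) :
    is_nine_pandigital_alt n = true ↔ (PySem.Int.toChars n).Perm ['1','2','3','4','5','6','7','8','9'] := by
  rw [is_nine_pandigital_alt]
  rw [show ("123456789".toList) = ['1','2','3','4','5','6','7','8','9'] from rfl]
  rw [show (PySem.Int.toStr n).toList = PySem.Int.toChars n from PySem.Int.toList_toStr n]
  rw [beq_iff_eq]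
  constructor
  · intro h
    exact (h ▸ PySem.List.sorted_perm (PySem.Int.toChars n) (fun c => c) false).symm
  · intro h
    exact PySem.List.sorted_eq_of_perm_of_pairwise_lt _ _ (fun c => c) h.symm (by decide)

lemma replicate_getD (e : ℕ) : (List.replicate 10 (0:Int)).getD e 0 = 0 := by
  simp only [List.getD_eq_getElem?_getD, List.getElem?_replicate]
  split <;> simp

lemma main_iff (n : Int) : is_nine_pandigital n = true ↔ is_nine_pandigital_alt n = true := by
  rw [alt_true_iff]
  constructor
  · intro hA
    rw [is_nine_pandigital] at hA
    by_cases hrange : (n < 100000000 || n > 999999999) = true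
    · rw [if_pos hrange] at hA; exact absurd hA (by simp)
    · rw [if_neg hrange] at hA
      simp only [Bool.or_eq_true, decide_eq_true_eq, not_or, not_lt] at hrange
      have hn : ((n.toNat:ℕ):Int) = n := Int.toNat_of_nonneg (by omega)
      have hmpos : 0 < n.toNat := by omega
      rw [← hn] at hA
      obtain ⟨hnd, hmem, hsum⟩ := (loop_char n.toNat (List.replicate 10 0) (by simp)
        (fun x hx => Or.inl (List.eq_of_mem_replicate hx))).mp hA
      have hlen9 : (Nat.digits 10 n.toNat).length = 9 := by
        have h0 : ((List.replicate 10 (0:Int)).drop 1).sum = 0 := by decide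
        rw [h0] at hsum
        omega
      have hperm := (digits_perm_iff n.toNat).mp ⟨hnd, fun e he => (hmem e he).1, hlen9⟩
      rw [← hn, toChars_pos n.toNat hmpos]
      have hmapped := hperm.map Nat.digitChar
      exact (List.reverse_perm _).trans hmapped
  · intro hB
    have hn0 : 0 ≤ n := by
      by_contra hneg
      have hm : '-' ∈ PySem.Int.toChars n := by
        rw [PySem.Int.toChars, if_pos (by omega)]
        exact List.mem_cons_self
      have := hB.mem_iff.mp hm
      simp at this
    have hn : ((n.toNat:ℕ):Int) = n := Int.toNat_of_nonneg hn0
    have hmpos : 0 < n.toNat := by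
      rcases Nat.eq_zero_or_pos n.toNat with h | h
      · exfalso
        rw [← hn, h] at hB
        have hq : PySem.Int.toChars ((0:ℕ):Int) = ['0'] := by decide
        rw [hq] at hB
        have := hB.length_eq
        simp at this
      · exact h
    rw [← hn, toChars_pos n.toNat hmpos] at hB
    have hmap : ((Nat.digits 10 n.toNat).map Nat.digitChar).Perm ['1','2','3','4','5','6','7','8','9'] :=
      (List.reverse_perm _).symm.trans hB
    have hg := hmap.map (fun c : Char => c.toNat - 48)
    have h1 : (['1','2','3','4','5','6','7','8','9'].map (fun c : Char => c.toNat - 48)) = [1,2,3,4,5,6,7,8,9] := by decide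
    have h2 : ((Nat.digits 10 n.toNat).map Nat.digitChar).map (fun c : Char => c.toNat - 48) = Nat.digits 10 n.toNat := by
      rw [List.map_map]
      rw [List.map_congr_left (g := id) (fun e he => by
        have hel : e < 10 := Nat.digits_lt_base (by norm_num) he
        interval_cases e <;> rfl)]
      exact List.map_id _
    rw [h1, h2] at hg
    obtain ⟨hnd, hne, hlen9⟩ := (digits_perm_iff n.toNat).mpr hg
    have hlt : n.toNat < 10^9 := (Nat.digits_length_le_iff (by norm_num) n.toNat).mp (by omega)
    have hge : 10^8 ≤ n.toNat := (Nat.lt_digits_length_iff (by norm_num) n.toNat).mp (by omega)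
    rw [is_nine_pandigital, if_neg (by simp; omega), ← hn]
    refine (loop_char n.toNat (List.replicate 10 0) (by simp)
      (fun x hx => Or.inl (List.eq_of_mem_replicate hx))).mpr
      ⟨hnd, fun e he => ⟨hne e he, by rw [replicate_getD]; omega⟩, ?_⟩
    have h0 : ((List.replicate 10 (0:Int)).drop 1).sum = 0 := by decide
    rw [h0, hlen9]
    rfl

-- ===== VERDICT (by name: the statement is the Claim_ definition above) =====
theorem is_nine_pandigital_spec : Claim_equal_is_nine_pandigital := by
  intro n _
  unfold Spec_is_nine_pandigital
  exact Bool.coe_iff_coe.mp (main_iff n)
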